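-- pv_equiv track=rewrite | github.com/omkar-javadwar/CodeWars | katas/kyu_6/Non-even_substrings.py | solve
-- ===== SOURCE A (Python) =====
-- def solve(s):
--     length = len(s)
--     count = 0
--
--     for i in range(0,length,1):
--         temp = ord(s[i]) - ord('0')
--
--         # If current digit is even, add
--         # count of substrings ending with
--         # it. The count is (i+1)
--         if temp % 2:
--             count += (i + 1)
--
--     return count
-- ===== SOURCE B (Python) =====
-- def solve(s):
--     # Reverse scan: keep a running count of odd digits seen so far (in the
--     # suffix); each position contributes that count (= substrings starting
--     # there that end in an odd digit).
--     odd = 0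
--     total = 0
--     for c in reversed(s):
--         if (ord(c) - ord('0')) % 2:
--             odd += 1
--         total += odd
--     return total
-- ===== Notes on version B (the rewrite author's own statement) =====
-- stated objective: alternative
-- what changed: Sums per-start-position suffix counts via a reverse scan with a running odd-digit counter, instead of adding (i+1) at each odd digit in a forward indexed scan.
import Mathlib
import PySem

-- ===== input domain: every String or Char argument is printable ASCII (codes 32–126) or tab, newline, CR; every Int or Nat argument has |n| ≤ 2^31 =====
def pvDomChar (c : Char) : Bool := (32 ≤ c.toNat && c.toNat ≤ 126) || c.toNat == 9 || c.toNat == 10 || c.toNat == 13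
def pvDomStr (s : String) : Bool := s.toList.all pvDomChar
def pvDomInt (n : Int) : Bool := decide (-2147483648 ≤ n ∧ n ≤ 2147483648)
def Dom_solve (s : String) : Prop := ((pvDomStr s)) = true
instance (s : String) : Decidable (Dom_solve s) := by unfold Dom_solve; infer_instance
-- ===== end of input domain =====

-- B replaces A's forward indexed scan (add i+1 at each odd digit) by a reverse scan
-- summing a running suffix odd-digit counter at every position: alternative decomposition, same cost.

-- ===== PORT A =====
def solve (s : String) : Int :=
  let cs := s.toList
  (PySem.List.pyRange 0 cs.length 1).foldl
    (fun count i =>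
      let temp : Int := ((PySem.List.pyGetD cs i ' ').toNat : Int) - 48
      if PySem.Int.mod temp 2 ≠ 0 then count + (i + 1) else count) 0

-- ===== PORT B =====
def solve_alt (s : String) : Int :=
  ((s.toList.reverse).foldl
    (fun (p : Int × Int) c =>
      let odd : Int := if PySem.Int.mod (((c.toNat : Int)) - 48) 2 ≠ 0 then p.1 + 1 else p.1
      (odd, p.2 + odd)) (0, 0)).2

-- ===== PRECONDITION & SPEC =====
def Spec_solve (s : String) (out : Int) : Prop := out = solve_alt s
instance (s : String) (out : Int) : Decidable (Spec_solve s out) := by unfold Spec_solve; infer_instance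

-- ===== CLAIM (what is proved, stated in full; the proofs are below) =====
def Claim_equal_solve : Prop := ∀ (s : String), Dom_solve s → Spec_solve s (solve s)

-- ===== LEMMAS AND PROOFS =====

/-- 1 if the character's digit value is odd in Python's sense, else 0. -/
def pvOddI (c : Char) : Int :=
  if PySem.Int.mod (((c.toNat : Int)) - 48) 2 ≠ 0 then 1 else 0

/-- Number of "odd" characters. -/
def pvCnt : List Char → Int
  | [] => 0
  | c :: t => pvOddI c + pvCnt t

/-- A's value as a structural recursion: Σ (i+1) over odd positions. -/
def pvAsum : List Char → Int
  | [] => 0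
  | c :: t => pvOddI c + pvCnt t + pvAsum t

/-- B's total as a structural recursion on the (already reversed) list. -/
def pvBsum : List Char → Int
  | [] => 0
  | c :: t => (if PySem.Int.mod (((c.toNat : Int)) - 48) 2 ≠ 0 then (1 : Int) + t.length else 0) + pvBsum t

lemma pvCnt_append (l m : List Char) : pvCnt (l ++ m) = pvCnt l + pvCnt m := by
  induction l with
  | nil => simp [pvCnt]
  | cons c t ih => simp [pvCnt, ih]; ring

lemma pvCnt_reverse (l : List Char) : pvCnt l.reverse = pvCnt l := by
  induction l with
  | nil => rfl
  | cons c t ih => simp [pvCnt_append, pvCnt, ih]; ring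

lemma pvBsum_append_singleton (l : List Char) (c : Char) :
    pvBsum (l ++ [c]) = pvBsum l + pvCnt l + pvOddI c := by
  induction l with
  | nil => simp [pvBsum, pvCnt, pvOddI]
  | cons d t ih =>
    simp only [List.cons_append, pvBsum, ih, pvCnt, List.length_append]
    by_cases h : PySem.Int.mod (((d.toNat : Int)) - 48) 2 ≠ 0
    · have hd : pvOddI d = 1 := by unfold pvOddI; exact if_pos h
      simp only [if_pos h, hd, List.length_cons, List.length_nil]
      push_cast; ring
    · have hd : pvOddI d = 0 := by unfold pvOddI; exact if_neg h
      simp only [if_neg h, hd]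
      ring

lemma pvBsum_reverse (l : List Char) : pvBsum l.reverse = pvAsum l := by
  induction l with
  | nil => rfl
  | cons c t ih =>
    simp only [List.reverse_cons, pvBsum_append_singleton, ih, pvCnt_reverse, pvAsum]
    ring

/-- Characterisation of B's fold with an arbitrary accumulator. -/
lemma solve_alt_fold (l : List Char) : ∀ (o t : Int),
    l.foldl
      (fun (p : Int × Int) c =>
        let odd : Int := if PySem.Int.mod (((c.toNat : Int)) - 48) 2 ≠ 0 then p.1 + 1 else p.1
        (odd, p.2 + odd)) (o, t)
      = (o + pvCnt l, t + l.length * o + pvBsum l) := by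
  induction l with
  | nil => intro o t; simp [pvCnt, pvBsum]
  | cons c tl ih =>
    intro o t
    simp only [List.foldl_cons]
    rw [ih]
    simp only [pvCnt, pvBsum, Prod.mk.injEq, List.length_cons]
    by_cases h : PySem.Int.mod (((c.toNat : Int)) - 48) 2 ≠ 0
    · simp only [if_pos h, pvOddI]
      refine ⟨by ring, ?_⟩; push_cast; ring
    · simp only [if_neg h, pvOddI]
      refine ⟨by ring, ?_⟩; push_cast; ring

/-- Characterisation of A's fold: fold over indices k..n with drop k cs = l. -/
lemma solve_fold (cs : List Char) : ∀ (l : List Char) (k : Nat) (acc : Int),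
    cs.drop k = l → k ≤ cs.length →
    (PySem.List.pyRange (k : Int) (cs.length : Int) 1).foldl
      (fun count i =>
        let temp : Int := ((PySem.List.pyGetD cs i ' ').toNat : Int) - 48
        if PySem.Int.mod temp 2 ≠ 0 then count + (i + 1) else count) acc
      = acc + (k : Int) * pvCnt l + pvAsum l := by
  intro l
  induction l with
  | nil =>
    intro k acc hd hk
    have hkl : k = cs.length := by
      have := congrArg List.length hd
      simp at this; omega
    subst hkl
    rw [PySem.List.pyRange_one_eq_nil (by omega)]
    simp [pvCnt, pvAsum]
  | cons c t ih =>
    intro k acc hd hk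
    have hlen : k + (1 + t.length) = cs.length := by
      have := congrArg List.length hd
      simp at this; omega
    have hklt : k < cs.length := by omega
    have hget : cs[k]'hklt = c := by
      have h0 : (cs.drop k)[0]? = some c := by rw [hd]; rfl
      rw [List.getElem?_drop] at h0
      simpa [List.getElem?_eq_getElem hklt] using h0
    rw [PySem.List.pyRange_one_cons (by exact_mod_cast hklt)]
    simp only [List.foldl_cons]
    have hstep : PySem.List.pyGetD cs (k : Int) ' ' = c := by
      rw [PySem.List.pyGetD_natCast]
      simp [List.getD_eq_getElem?_getD, List.getElem?_eq_getElem hklt, hget]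
    have hd' : cs.drop (k + 1) = t := by
      have h1 : (cs.drop k).drop 1 = t := by rw [hd]; rfl
      rw [List.drop_drop] at h1
      simpa [Nat.add_comm] using h1
    have hcast : ((k : Int) + 1) = ((k + 1 : Nat) : Int) := by push_cast; ring
    rw [hstep, hcast, ih (k + 1) _ hd' (by omega)]
    simp only [pvCnt, pvAsum, pvOddI]
    by_cases h : PySem.Int.mod (((c.toNat : Int)) - 48) 2 ≠ 0
    · simp only [if_pos h]
      push_cast
      ring
    · simp only [if_neg h]
      push_cast
      ring

-- ===== VERDICT (by name: the statement is the Claim_ definition above) =====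
theorem solve_spec : Claim_equal_solve := by
  intro s _
  show solve s = solve_alt s
  have hA := solve_fold s.toList s.toList 0 0 (by simp) (Nat.zero_le _)
  have hB := solve_alt_fold s.toList.reverse 0 0
  simp only [Nat.cast_zero] at hA
  simp only [solve, solve_alt]
  rw [hA, hB, pvBsum_reverse]
  ring
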